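-- pv_equiv track=rewrite | github.com/Eunseo23/Lightweight | python/Step0_Extract_Dataset/ChunksToOneLine.py | merge_adjacent_differences
-- ===== SOURCE A (Python) =====
-- def merge_adjacent_differences(file1_lines, file2_lines):
--     merged_file1 = []
--     merged_file2 = []
--
--     i = 0
--     while i < max(len(file1_lines), len(file2_lines)):
--         file1_line = file1_lines[i].rstrip() if i < len(file1_lines) else ""
--         file2_line = file2_lines[i].rstrip() if i < len(file2_lines) else ""
--
--         # 만약 현재 줄이 다르다면
--         if file1_line != file2_line:
--             merged_file1_line = file1_line
--             merged_file2_line = file2_line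
--
--             # 연속된 여러 줄이 차이가 있는지 확인
--             while i + 1 < max(len(file1_lines), len(file2_lines)):
--                 next_file1_line = file1_lines[i + 1].rstrip() if i + 1 < len(file1_lines) else ""
--                 next_file2_line = file2_lines[i + 1].rstrip() if i + 1 < len(file2_lines) else ""
--
--                 if next_file1_line != next_file2_line:
--                     # 차이가 있는 경우 줄을 병합
--                     merged_file1_line += " " + next_file1_line
--                     merged_file2_line += " " + next_file2_line
--                     i += 1  # 인덱스를 증가시켜 연속된 줄들을 처리
--                 else:
--                     break  # 차이가 없으면 루프 탈출
--
--             # 병합된 줄 추가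
--             merged_file1.append(merged_file1_line)
--             merged_file2.append(merged_file2_line)
--         else:
--             # 줄이 다르지 않으면 그대로 추가
--             merged_file1.append(file1_line)
--             merged_file2.append(file2_line)
--
--         # 다음 줄로 이동
--         i += 1
--
--     return merged_file1, merged_file2
-- ===== SOURCE B (Python) =====
-- from itertools import groupby
--
-- def merge_adjacent_differences(file1_lines, file2_lines):
--     n = max(len(file1_lines), len(file2_lines))
--     pairs = [
--         (file1_lines[i].rstrip() if i < len(file1_lines) else "",
--          file2_lines[i].rstrip() if i < len(file2_lines) else "")
--         for i in range(n)
--     ]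
--     merged_file1, merged_file2 = [], []
--     for differs, group in groupby(pairs, key=lambda p: p[0] != p[1]):
--         group = list(group)
--         if differs:
--             merged_file1.append(" ".join(p[0] for p in group))
--             merged_file2.append(" ".join(p[1] for p in group))
--         else:
--             for a, b in group:
--                 merged_file1.append(a)
--                 merged_file2.append(b)
--     return merged_file1, merged_file2
-- ===== Notes on version B (the rewrite author's own statement) =====
-- stated objective: simpler
-- what changed: A's single index-driven while loop with a nested merging while is decomposed into two phases: materialize the list of rstrip-normalized, empty-padded line pairs, then group consecutive pairs with itertools.groupby on the differ predicate, joining each differing run with ' '.join and emitting equal pairs one by one.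
import Mathlib
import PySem

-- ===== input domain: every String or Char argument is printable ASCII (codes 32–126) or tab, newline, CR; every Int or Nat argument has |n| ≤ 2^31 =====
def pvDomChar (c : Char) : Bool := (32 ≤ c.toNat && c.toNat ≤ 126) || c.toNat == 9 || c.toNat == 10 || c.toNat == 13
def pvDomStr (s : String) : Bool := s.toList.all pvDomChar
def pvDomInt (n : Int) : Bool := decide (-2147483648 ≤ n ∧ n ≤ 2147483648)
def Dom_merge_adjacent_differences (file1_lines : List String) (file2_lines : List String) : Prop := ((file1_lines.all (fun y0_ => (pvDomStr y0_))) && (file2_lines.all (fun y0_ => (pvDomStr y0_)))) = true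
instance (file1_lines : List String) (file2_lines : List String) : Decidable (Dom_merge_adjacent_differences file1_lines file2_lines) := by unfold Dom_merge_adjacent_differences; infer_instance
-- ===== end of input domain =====

-- B replaces A's interleaved index loop (with its nested merging while) by a two-phase
-- decomposition: materialize the normalized line pairs, then group consecutive differing
-- pairs (itertools.groupby) and emit each group at once; objective: simpler.

-- ===== PORT A =====
-- `file_lines[i].rstrip() if i < len(file_lines) else ""` (this expression occurs verbatim in both Pythons)
def normLine (xs : List String) (i : Nat) : String :=
  if h : i < xs.length then PySem.Str.rstrip xs[i] else ""

-- inner `while i + 1 < max(...)` loop of A; returns (merged1, merged2, final i).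
-- fuel only makes the recursion structural: each iteration increases i, and the loop is
-- always entered with fuel ≥ n - i, so the fuel never runs out before the loop condition fails.
def innerA (f1 f2 : List String) (n : Nat) : Nat → String → String → Nat → String × String × Nat
  | 0, m1, m2, i => (m1, m2, i)
  | fuel + 1, m1, m2, i =>
    if i + 1 < n then
      if normLine f1 (i + 1) ≠ normLine f2 (i + 1) then
        innerA f1 f2 n fuel (m1 ++ " " ++ normLine f1 (i + 1)) (m2 ++ " " ++ normLine f2 (i + 1)) (i + 1)
      else (m1, m2, i)
    else (m1, m2, i)

-- outer `while i < max(...)` loop of A (same fuel discipline: called with fuel ≥ n - i)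
def outerA (f1 f2 : List String) (n : Nat) : Nat → Nat → List String → List String → List String × List String
  | 0, _, acc1, acc2 => (acc1, acc2)
  | fuel + 1, i, acc1, acc2 =>
    if i < n then
      if normLine f1 i ≠ normLine f2 i then
        match innerA f1 f2 n fuel (normLine f1 i) (normLine f2 i) i with
        | (m1, m2, i') => outerA f1 f2 n fuel (i' + 1) (acc1 ++ [m1]) (acc2 ++ [m2])
      else
        outerA f1 f2 n fuel (i + 1) (acc1 ++ [normLine f1 i]) (acc2 ++ [normLine f2 i])
    else (acc1, acc2)

def merge_adjacent_differences (file1_lines : List String) (file2_lines : List String) : List String × List String :=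
  outerA file1_lines file2_lines (max file1_lines.length file2_lines.length)
    (max file1_lines.length file2_lines.length) 0 [] []

-- ===== PORT B =====
-- the `for differs, group in groupby(pairs, key=lambda p: p[0] != p[1])` loop:
-- consecutive runs of differing pairs are joined, runs of equal pairs emitted one by one.
-- fuel (= initial list length) only makes the run-skipping recursion structural.
def groupRecB : Nat → List (String × String) → List String × List String
  | 0, _ => ([], [])
  | _, [] => ([], [])
  | fuel + 1, (a, b) :: rest =>
    if a ≠ b then
      let run := rest.takeWhile (fun p => p.1 != p.2)
      let r := groupRecB fuel (rest.dropWhile (fun p => p.1 != p.2))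
      (PySem.Str.join " " (a :: run.map (·.1)) :: r.1,
       PySem.Str.join " " (b :: run.map (·.2)) :: r.2)
    else
      let r := groupRecB fuel rest
      (a :: r.1, b :: r.2)

def merge_adjacent_differences_alt (file1_lines : List String) (file2_lines : List String) : List String × List String :=
  let n := max file1_lines.length file2_lines.length
  let pairs := (List.range n).map (fun i => (normLine file1_lines i, normLine file2_lines i))
  groupRecB pairs.length pairs

-- ===== PRECONDITION & SPEC =====
def Spec_merge_adjacent_differences (file1_lines : List String) (file2_lines : List String) (out : List String × List String) : Prop := out = merge_adjacent_differences_alt file1_lines file2_lines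
instance (file1_lines : List String) (file2_lines : List String) (out : List String × List String) : Decidable (Spec_merge_adjacent_differences file1_lines file2_lines out) := by unfold Spec_merge_adjacent_differences; infer_instance

-- ===== CLAIM (what is proved, stated in full; the proofs are below) =====
def Claim_equal_merge_adjacent_differences : Prop := ∀ (file1_lines : List String) (file2_lines : List String), Dom_merge_adjacent_differences file1_lines file2_lines → Spec_merge_adjacent_differences file1_lines file2_lines (merge_adjacent_differences file1_lines file2_lines)

-- ===== LEMMAS AND PROOFS =====

-- equation lemmas for groupRecB
theorem groupRecB_nil (fuel : Nat) : groupRecB fuel [] = ([], []) := by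
  cases fuel <;> rfl

theorem groupRecB_cons_ne (fuel : Nat) (a b : String) (rest : List (String × String)) (h : a ≠ b) :
    groupRecB (fuel + 1) ((a, b) :: rest) =
      (PySem.Str.join " " (a :: (rest.takeWhile (fun p => p.1 != p.2)).map (·.1)) ::
         (groupRecB fuel (rest.dropWhile (fun p => p.1 != p.2))).1,
       PySem.Str.join " " (b :: (rest.takeWhile (fun p => p.1 != p.2)).map (·.2)) ::
         (groupRecB fuel (rest.dropWhile (fun p => p.1 != p.2))).2) := by
  rw [groupRecB]; simp [h]

theorem groupRecB_cons_eq (fuel : Nat) (a b : String) (rest : List (String × String)) (h : a = b) :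
    groupRecB (fuel + 1) ((a, b) :: rest) =
      ((a :: (groupRecB fuel rest).1), (b :: (groupRecB fuel rest).2)) := by
  rw [groupRecB]; simp [h]

-- groupRecB does not depend on the fuel once the fuel covers the list length
theorem groupRecB_congr : ∀ (fuel fuel' : Nat) (l : List (String × String)),
    l.length ≤ fuel → l.length ≤ fuel' → groupRecB fuel l = groupRecB fuel' l := by
  intro fuel
  induction fuel with
  | zero =>
    intro fuel' l h _
    have hl : l = [] := List.eq_nil_of_length_eq_zero (Nat.le_zero.mp h)
    subst hl
    rw [groupRecB_nil, groupRecB_nil]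
  | succ fuel ih =>
    intro fuel' l h h'
    match l, fuel' with
    | [], _ => rw [groupRecB_nil, groupRecB_nil]
    | (a, b) :: rest, 0 => simp at h'
    | (a, b) :: rest, fuel' + 1 =>
      simp only [List.length_cons, Nat.add_le_add_iff_right] at h h'
      by_cases hab : a ≠ b
      · rw [groupRecB_cons_ne fuel a b rest hab, groupRecB_cons_ne fuel' a b rest hab,
          ih fuel' _ (le_trans (List.length_dropWhile_le _ _) h)
            (le_trans (List.length_dropWhile_le _ _) h')]
      · simp only [not_not] at hab
        rw [groupRecB_cons_eq fuel a b rest hab, groupRecB_cons_eq fuel' a b rest hab,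
          ih fuel' rest h h']

-- the suffix of normalized pairs from index i
def pairsFrom (f1 f2 : List String) (n i : Nat) : List (String × String) :=
  (List.range' i (n - i)).map (fun j => (normLine f1 j, normLine f2 j))

theorem pairsFrom_eq_nil (f1 f2 : List String) (n i : Nat) (h : n ≤ i) :
    pairsFrom f1 f2 n i = [] := by
  simp [pairsFrom, Nat.sub_eq_zero_of_le h]

theorem pairsFrom_cons (f1 f2 : List String) (n i : Nat) (h : i < n) :
    pairsFrom f1 f2 n i =
      (normLine f1 i, normLine f2 i) :: pairsFrom f1 f2 n (i + 1) := by
  unfold pairsFrom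
  rw [show n - i = (n - (i + 1)) + 1 by omega, List.range'_succ]
  simp

theorem chars_join_cons (sep a b : List Char) (L : List (List Char)) :
    PySem.Chars.join sep ((a ++ sep ++ b) :: L) = a ++ sep ++ PySem.Chars.join sep (b :: L) := by
  cases L with
  | nil => rw [PySem.Chars.join_singleton, PySem.Chars.join_singleton]
  | cons c cs =>
    rw [PySem.Chars.join_cons_cons, PySem.Chars.join_cons_cons]
    simp

-- " ".join(m :: l) is the left fold appending " " ++ x
theorem join_cons_foldl (l : List String) (m : String) :
    PySem.Str.join " " (m :: l) = l.foldl (fun acc x => acc ++ " " ++ x) m := by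
  induction l generalizing m with
  | nil =>
    apply String.ext
    simp [PySem.Str.join, PySem.Chars.join_singleton]
  | cons x xs ih =>
    rw [List.foldl_cons, ← ih]
    apply String.ext
    simp only [PySem.Str.join, List.map_cons]
    have h1 : (m ++ " " ++ x).toList = m.toList ++ " ".toList ++ x.toList := by simp
    rw [h1, chars_join_cons, PySem.Chars.join_cons_cons]

theorem innerA_spec (f1 f2 : List String) (n : Nat) :
    ∀ (fuel i : Nat) (m1 m2 : String), n ≤ i + 1 + fuel →
      innerA f1 f2 n fuel m1 m2 i =
        (((pairsFrom f1 f2 n (i + 1)).takeWhile (fun p => p.1 != p.2)).foldl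
            (fun acc p => acc ++ " " ++ p.1) m1,
         ((pairsFrom f1 f2 n (i + 1)).takeWhile (fun p => p.1 != p.2)).foldl
            (fun acc p => acc ++ " " ++ p.2) m2,
         i + ((pairsFrom f1 f2 n (i + 1)).takeWhile (fun p => p.1 != p.2)).length) := by
  intro fuel
  induction fuel with
  | zero =>
    intro i m1 m2 hle
    rw [pairsFrom_eq_nil f1 f2 n (i + 1) (by omega)]
    simp [innerA]
  | succ fuel ih =>
    intro i m1 m2 hle
    by_cases h : i + 1 < n
    · rw [pairsFrom_cons f1 f2 n (i + 1) h]
      by_cases hne : normLine f1 (i + 1) ≠ normLine f2 (i + 1)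
      · rw [innerA, if_pos h, if_pos hne, ih (i + 1) _ _ (by omega)]
        simp only [List.takeWhile_cons,
          show ((normLine f1 (i+1), normLine f2 (i+1)).1 != (normLine f1 (i+1), normLine f2 (i+1)).2) = true by simpa using hne,
          if_true, List.foldl_cons, List.length_cons]
        refine congrArg _ (congrArg _ ?_)
        omega
      · rw [innerA, if_pos h, if_neg hne]
        simp only [not_not] at hne
        simp [hne]
    · rw [pairsFrom_eq_nil f1 f2 n (i + 1) (by omega), innerA, if_neg h]
      simp

theorem dropWhile_pairsFrom (f1 f2 : List String) (n : Nat) :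
    ∀ (k i : Nat), n ≤ i + k →
      (pairsFrom f1 f2 n i).dropWhile (fun p => p.1 != p.2) =
        pairsFrom f1 f2 n (i + ((pairsFrom f1 f2 n i).takeWhile (fun p => p.1 != p.2)).length) := by
  intro k
  induction k with
  | zero =>
    intro i hle
    rw [pairsFrom_eq_nil f1 f2 n i (by omega)]
    rw [pairsFrom_eq_nil f1 f2 n _ (by omega)]
    rfl
  | succ k ih =>
    intro i hle
    by_cases h : i < n
    · rw [pairsFrom_cons f1 f2 n i h]
      by_cases hne : normLine f1 i ≠ normLine f2 i
      · simp only [List.dropWhile_cons, List.takeWhile_cons,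
          show ((normLine f1 i, normLine f2 i).1 != (normLine f1 i, normLine f2 i).2) = true by simpa using hne,
          if_true]
        rw [ih (i + 1) (by omega)]
        refine congrArg _ ?_
        simp only [List.length_cons]
        omega
      · simp only [not_not] at hne
        simp only [List.dropWhile_cons, List.takeWhile_cons, hne, bne_self_eq_false,
          Bool.false_eq_true, if_false, List.length_nil, Nat.add_zero]
        rw [pairsFrom_cons f1 f2 n i h, hne]
    · rw [pairsFrom_eq_nil f1 f2 n i (by omega)]
      rw [pairsFrom_eq_nil f1 f2 n _ (by omega)]
      rfl

theorem outerA_spec (f1 f2 : List String) (n : Nat) :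
    ∀ (fuel i : Nat) (acc1 acc2 : List String), n ≤ i + fuel →
      outerA f1 f2 n fuel i acc1 acc2 =
        (acc1 ++ (groupRecB (pairsFrom f1 f2 n i).length (pairsFrom f1 f2 n i)).1,
         acc2 ++ (groupRecB (pairsFrom f1 f2 n i).length (pairsFrom f1 f2 n i)).2) := by
  intro fuel
  induction fuel with
  | zero =>
    intro i acc1 acc2 hle
    rw [pairsFrom_eq_nil f1 f2 n i (by omega)]
    simp [outerA, groupRecB_nil]
  | succ fuel ih =>
    intro i acc1 acc2 hle
    by_cases hi : i < n
    · rw [pairsFrom_cons f1 f2 n i hi]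
      by_cases hne : normLine f1 i ≠ normLine f2 i
      · rw [outerA, if_pos hi, if_pos hne,
          innerA_spec f1 f2 n fuel i (normLine f1 i) (normLine f2 i) (by omega)]
        dsimp only
        rw [ih _ _ _ (by omega)]
        simp only [List.length_cons]
        rw [groupRecB_cons_ne _ _ _ _ hne,
          groupRecB_congr (pairsFrom f1 f2 n (i + 1)).length
            ((pairsFrom f1 f2 n (i + 1)).dropWhile (fun p => p.1 != p.2)).length _
            (List.length_dropWhile_le _ _) (le_refl _)]
        rw [dropWhile_pairsFrom f1 f2 n n (i + 1) (by omega)]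
        have harr : (i + 1) + ((pairsFrom f1 f2 n (i + 1)).takeWhile (fun p => p.1 != p.2)).length
            = i + ((pairsFrom f1 f2 n (i + 1)).takeWhile (fun p => p.1 != p.2)).length + 1 := by omega
        rw [harr]
        simp only [join_cons_foldl, List.foldl_map]
        simp [List.append_assoc]
      · rw [outerA, if_pos hi, if_neg hne]
        simp only [not_not] at hne
        rw [ih (i + 1) _ _ (by omega)]
        simp only [List.length_cons]
        rw [groupRecB_cons_eq _ _ _ _ hne]
        simp
    · rw [pairsFrom_eq_nil f1 f2 n i (by omega), outerA, if_neg hi]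
      simp [groupRecB_nil]

-- ===== VERDICT (by name: the statement is the Claim_ definition above) =====
theorem merge_adjacent_differences_spec : Claim_equal_merge_adjacent_differences := by
  intro f1 f2 _
  unfold Spec_merge_adjacent_differences merge_adjacent_differences merge_adjacent_differences_alt
  rw [outerA_spec f1 f2 _ _ 0 [] [] (by omega)]
  simp [pairsFrom, List.range_eq_range']
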